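-- pv_equiv track=rewrite | github.com/yishiezerzer-dot/MFP_analysis_app | lab_gui/lcms_polymer_match.py | estimate_num_compositions
-- ===== SOURCE A (Python) =====
-- from math import comb
--
-- def estimate_num_compositions(n_monomers: int, max_dp: int, min_dp: int = 1) -> int:
--     """Estimate how many compositions will be generated.
--
--     Counts weak compositions (allowing zeros) for each total DP and sums.
--     """
--     n = int(n_monomers)
--     if n <= 0:
--         return 0
--     lo = int(min_dp)
--     hi = int(max_dp)
--     if hi < lo:
--         return 0
--     lo = max(0, lo)
--     hi = max(0, hi)
--     # #solutions to c1+..+cn = k with ci>=0 is C(k+n-1, n-1)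
--     return int(sum(comb(int(k) + n - 1, n - 1) for k in range(lo, hi + 1)))
-- ===== SOURCE B (Python) =====
-- def _choose(m: int, k: int) -> int:
--     """C(m, k) by the multiplicative product loop (exact at every step)."""
--     if k < 0 or k > m:
--         return 0
--     c = 1
--     for i in range(1, k + 1):
--         c = c * (m - k + i) // i
--     return c
--
-- def estimate_num_compositions(n_monomers: int, max_dp: int, min_dp: int = 1) -> int:
--     """Closed form via the hockey-stick identity: the banded sum of weak-composition
--     counts equals C(hi+n, n) - C(lo+n-1, n); binomials computed by _choose's loop."""
--     n = int(n_monomers)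
--     if n <= 0 or int(max_dp) < int(min_dp):
--         return 0
--     hi = max(int(max_dp), 0)
--     lo = max(int(min_dp), 0)
--     return _choose(hi + n, n) - _choose(lo + n - 1, n)
-- ===== Notes on version B (the rewrite author's own statement) =====
-- stated objective: alternative
-- what changed: Replaced the loop summing comb(k+n-1, n-1) over k in [lo, hi] by the hockey-stick closed form _choose(hi+n, n) - _choose(lo+n-1, n), where _choose computes each binomial by a hand-written exact multiplicative product loop instead of math.comb; two binomials instead of a sum of (hi-lo+1) of them.
import Mathlib
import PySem

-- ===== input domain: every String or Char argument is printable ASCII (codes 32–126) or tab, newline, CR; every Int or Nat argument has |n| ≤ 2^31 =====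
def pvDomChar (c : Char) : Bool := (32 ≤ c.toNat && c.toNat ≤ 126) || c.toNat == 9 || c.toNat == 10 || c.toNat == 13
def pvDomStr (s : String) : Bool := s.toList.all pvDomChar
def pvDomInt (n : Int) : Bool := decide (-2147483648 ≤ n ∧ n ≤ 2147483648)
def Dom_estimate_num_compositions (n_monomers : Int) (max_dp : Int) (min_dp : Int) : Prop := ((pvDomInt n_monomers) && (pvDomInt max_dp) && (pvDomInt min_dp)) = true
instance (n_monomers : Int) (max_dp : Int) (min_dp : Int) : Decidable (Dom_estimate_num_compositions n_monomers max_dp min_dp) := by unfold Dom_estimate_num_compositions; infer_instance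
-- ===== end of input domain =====

-- B replaces A's k-loop of math.comb calls by the hockey-stick closed form
-- C(hi+n, n) - C(lo+n-1, n), with the two binomials computed by a hand-written
-- exact multiplicative product loop; same return value everywhere.

-- math.comb(a, b): exact for 0 ≤ a, 0 ≤ b — the only arguments A passes to it
-- (k ≥ lo ≥ 0 and n ≥ 1, so k+n-1 ≥ 0 and n-1 ≥ 0).
def pyComb (a b : Int) : Int := (Nat.choose a.toNat b.toNat : Int)

-- ===== PORT A =====
def estimate_num_compositions (n_monomers : Int) (max_dp : Int) (min_dp : Int) : Int :=
  let n := n_monomers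
  if n ≤ 0 then 0
  else
    let lo := min_dp
    let hi := max_dp
    if hi < lo then 0
    else
      let lo := max 0 lo
      let hi := max 0 hi
      ((PySem.List.pyRange lo (hi + 1) 1).map (fun k => pyComb (k + n - 1) (n - 1))).sum

-- ===== PORT B =====
-- _choose(m, k): C(m, k) by the multiplicative product loop (exact at every step).
def choose_alt (m k : Int) : Int :=
  if k < 0 ∨ k > m then 0
  else (PySem.List.pyRange 1 (k + 1) 1).foldl
         (fun c i => PySem.Int.floordiv (c * (m - k + i)) i) 1

def estimate_num_compositions_alt (n_monomers : Int) (max_dp : Int) (min_dp : Int) : Int :=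
  let n := n_monomers
  if n ≤ 0 ∨ max_dp < min_dp then 0
  else
    let hi := max max_dp 0
    let lo := max min_dp 0
    choose_alt (hi + n) n - choose_alt (lo + n - 1) n

-- ===== PRECONDITION & SPEC =====
def Spec_estimate_num_compositions (n_monomers : Int) (max_dp : Int) (min_dp : Int) (out : Int) : Prop := out = estimate_num_compositions_alt n_monomers max_dp min_dp
instance (n_monomers : Int) (max_dp : Int) (min_dp : Int) (out : Int) : Decidable (Spec_estimate_num_compositions n_monomers max_dp min_dp out) := by unfold Spec_estimate_num_compositions; infer_instance

-- ===== CLAIM =====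
def Claim_equal_estimate_num_compositions : Prop := ∀ (n_monomers : Int) (max_dp : Int) (min_dp : Int), Dom_estimate_num_compositions n_monomers max_dp min_dp → Spec_estimate_num_compositions n_monomers max_dp min_dp (estimate_num_compositions n_monomers max_dp min_dp)

-- ===== LEMMAS AND PROOFS =====

-- Pascal's rule, phrased on pyComb for nonnegative arguments: C(x, m) + C(x, m+1) = C(x+1, m+1).
theorem pyComb_pascal (x m : Int) (hx : 0 ≤ x) (hm : 0 ≤ m) :
    pyComb x m + pyComb x (m + 1) = pyComb (x + 1) (m + 1) := by
  unfold pyComb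
  have h1 : (x + 1).toNat = x.toNat + 1 := by omega
  have h2 : (m + 1).toNat = m.toNat + 1 := by omega
  rw [h1, h2, Nat.choose_succ_succ']
  push_cast; ring

-- Hockey stick, in the form the banded sum needs:
-- ∑_{j=a}^{a+k} C(j+n-1, n-1) = C(a+k+n, n) - C(a+n-1, n), stated additively.
theorem hockey (a n : Int) (ha : 0 ≤ a) (hn : 1 ≤ n) : ∀ k : Nat,
    ((PySem.List.pyRange a (a + (k : Int) + 1) 1).map (fun j => pyComb (j + n - 1) (n - 1))).sum
      + pyComb (a + n - 1) n = pyComb (a + (k : Int) + n) n := by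
  intro k
  induction k with
  | zero =>
      simp only [Nat.cast_zero, add_zero, PySem.List.pyRange_one_singleton, List.map_cons,
        List.map_nil, List.sum_cons, List.sum_nil, add_zero]
      have := pyComb_pascal (a + n - 1) (n - 1) (by omega) (by omega)
      have hn1 : n - 1 + 1 = n := by ring
      rw [hn1] at this
      have hx : a + n - 1 + 1 = a + n := by ring
      rw [hx] at this
      linarith [this]
  | succ k ih =>
      have hstep : PySem.List.pyRange a (a + ((k : Int) + 1) + 1) 1
          = PySem.List.pyRange a (a + (k : Int) + 1) 1 ++ [a + (k : Int) + 1] := by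
        have : a + ((k : Int) + 1) + 1 = (a + (k : Int) + 1) + 1 := by ring
        rw [this, PySem.List.pyRange_one_succ_right (by omega)]
      push_cast
      push_cast at ih
      rw [hstep, List.map_append, List.sum_append]
      simp only [List.map_cons, List.map_nil, List.sum_cons, List.sum_nil, add_zero]
      have hp := pyComb_pascal (a + (k : Int) + n) (n - 1) (by omega) (by omega)
      have hn1 : n - 1 + 1 = n := by ring
      rw [hn1] at hp
      have he : a + (k : Int) + 1 + n - 1 = a + (k : Int) + n := by ring
      rw [he]
      have he2 : a + (k : Int) + n + 1 = a + ((k : Int) + 1) + n := by ring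
      rw [he2] at hp
      linarith [ih, hp]

-- The product loop computes the binomial: after j steps the accumulator is C(m-k+j, j).
theorem choose_loop (m k : Int) (hk : 0 ≤ k) (hkm : k ≤ m) : ∀ j : Nat, (j : Int) ≤ k →
    (PySem.List.pyRange 1 ((j : Int) + 1) 1).foldl
        (fun c i => PySem.Int.floordiv (c * (m - k + i)) i) 1
      = pyComb (m - k + (j : Int)) (j : Int) := by
  intro j
  induction j with
  | zero =>
      intro _
      simp [PySem.List.pyRange_one_eq_nil, pyComb]
  | succ j ih =>
      intro hj
      push_cast at hj ⊢
      have hstep : PySem.List.pyRange 1 ((j : Int) + 1 + 1) 1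
          = PySem.List.pyRange 1 ((j : Int) + 1) 1 ++ [(j : Int) + 1] := by
        exact PySem.List.pyRange_one_succ_right (by omega)
      rw [hstep, List.foldl_append, ih (by omega)]
      simp only [List.foldl_cons, List.foldl_nil]
      -- Pascal step: acc * (m-k+j+1) = C(m-k+j+1, j+1) * (j+1), exact division.
      have hx : 0 ≤ m - k + (j : Int) := by omega
      have hkey : pyComb (m - k + (j : Int)) (j : Int) * (m - k + ((j : Int) + 1))
          = pyComb (m - k + ((j : Int) + 1)) ((j : Int) + 1) * ((j : Int) + 1) := by
        unfold pyComb
        have h1 : (m - k + ((j : Int) + 1)).toNat = (m - k + (j : Int)).toNat + 1 := by omega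
        have h2 : (((j : Int)) + 1).toNat = ((j : Int)).toNat + 1 := by omega
        have h3 : ((j : Int)).toNat = j := by omega
        rw [h1, h2, h3]
        have hT : m - k + ((j : Int) + 1) = ((m - k + (j : Int)).toNat : Int) + 1 := by omega
        rw [hT]
        have := Nat.add_one_mul_choose_eq (m - k + (j : Int)).toNat j
        push_cast at this ⊢
        linarith [this]
      rw [hkey, PySem.Int.floordiv_eq_ediv_of_pos (by omega)]
      exact Int.mul_ediv_cancel _ (by omega)

-- The hand-rolled loop agrees with math.comb for k ≥ 1 (including the k > m zero case).
theorem choose_alt_eq (m k : Int) (hk : 1 ≤ k) : choose_alt m k = pyComb m k := by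
  unfold choose_alt
  by_cases hm : k > m
  · have : pyComb m k = 0 := by
      unfold pyComb
      have : m.toNat < k.toNat := by omega
      simp [Nat.choose_eq_zero_of_lt this]
    simp [hm, this]
  · have hkm : k ≤ m := by omega
    have h0 : ¬ (k < 0 ∨ k > m) := by omega
    simp only [h0, if_false]
    have hj : ((k.toNat : Int)) = k := by omega
    have := choose_loop m k (by omega) hkm k.toNat (by omega)
    rw [hj] at this
    rw [this]
    congr 1
    omega

-- ===== VERDICT =====
theorem estimate_num_compositions_spec : Claim_equal_estimate_num_compositions := by
  intro n hi0 lo0 _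
  unfold Spec_estimate_num_compositions estimate_num_compositions estimate_num_compositions_alt
  by_cases hn : n ≤ 0
  · simp [hn]
  · by_cases hlt : hi0 < lo0
    · simp [hn, hlt]
    · simp only [hn, hlt, or_self, if_false]
      set a := max 0 lo0 with ha
      set b := max 0 hi0 with hb
      have ha' : max lo0 0 = a := by omega
      have hb' : max hi0 0 = b := by omega
      rw [ha', hb']
      have ha0 : 0 ≤ a := le_max_left _ _
      have hab : a ≤ b := by omega
      have hn1 : 1 ≤ n := by omega
      rw [choose_alt_eq _ _ hn1, choose_alt_eq _ _ hn1]
      have hk : b = a + ((b - a).toNat : Int) := by omega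
      have h := hockey a n ha0 hn1 (b - a).toNat
      rw [← hk] at h
      linarith [h]
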